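-- pv_equiv track=rewrite | github.com/cokkum113/202tooAlgo | sorting.py | solution
-- ===== SOURCE A (Python) =====
-- def solution(numbers):
--     answer = ''
--     nums = []
--
--     for i, val in enumerate(numbers):
--         #100000
--         x = val % 10
--         nums.append([str(x), i])
--
--     nums.sort(key = lambda x : x[0], reverse= True)
--     #Reverse하면 시간이 100000 * 100000 인가용? 그러면 10 ^ 10으로 시초 뜨는 건가요?
--     #이 방식은 3번째 방식으로 밖에 못 푸나용?
--
--     for i in nums:
--         #100000
--         answer += str(numbers[i[1]])
--
--     return answer
-- ===== SOURCE B (Python) =====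
-- def solution(numbers):
--     # Bucket pass per last digit, 9 down to 0 (stable: original order kept within a digit);
--     # no sorting at all.
--     return ''.join(str(v) for d in range(9, -1, -1) for v in numbers if v % 10 == d)
-- ===== Notes on version B (the rewrite author's own statement) =====
-- stated objective: faster
-- what changed: Replaces the stable sort by string last-digit key with ten direct bucket passes (digits 9 down to 0) concatenated, removing the sort and the index-indirection entirely.
import Mathlib
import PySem

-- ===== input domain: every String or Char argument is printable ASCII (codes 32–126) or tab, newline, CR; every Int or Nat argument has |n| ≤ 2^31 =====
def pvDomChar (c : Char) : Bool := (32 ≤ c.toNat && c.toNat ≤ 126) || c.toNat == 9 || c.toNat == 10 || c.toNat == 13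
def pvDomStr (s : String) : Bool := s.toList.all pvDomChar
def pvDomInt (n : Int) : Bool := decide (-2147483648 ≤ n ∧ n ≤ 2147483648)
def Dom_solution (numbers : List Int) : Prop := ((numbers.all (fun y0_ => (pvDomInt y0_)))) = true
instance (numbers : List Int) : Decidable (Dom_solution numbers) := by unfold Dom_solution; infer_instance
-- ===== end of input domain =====

-- B replaces A's stable sort by a ten-bucket digit scan (9 down to 0); equivalence of the
-- RETURN values is proved (A also sorts its local list in place, which no caller observes).

-- ===== PORT A =====
-- numbers[i[1]] always has a valid index (it came from enumerate), so pyGetD's default is never used.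
def solution (numbers : List Int) : String :=
  let nums : List (String × Int) :=
    (PySem.List.enumerate numbers).foldl
      (fun acc p => acc ++ [(PySem.Int.toStr (PySem.Int.mod p.2 10), p.1)]) []
  let nums := PySem.List.sorted nums (fun x => x.1) true
  nums.foldl (fun acc i => acc ++ PySem.Int.toStr (PySem.List.pyGetD numbers i.2 0)) ""

-- ===== PORT B =====
def solution_alt (numbers : List Int) : String :=
  PySem.Str.join ""
    ((PySem.List.pyRange 9 (-1) (-1)).flatMap
      (fun d => (numbers.filter (fun v => PySem.Int.mod v 10 == d)).map PySem.Int.toStr))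

-- ===== PRECONDITION & SPEC =====
def Spec_solution (numbers : List Int) (out : String) : Prop := out = solution_alt numbers
instance (numbers : List Int) (out : String) : Decidable (Spec_solution numbers out) := by unfold Spec_solution; infer_instance

-- ===== CLAIM (what is proved, stated in full; the proofs are below) =====
def Claim_equal_solution : Prop := ∀ (numbers : List Int), Dom_solution numbers → Spec_solution numbers (solution numbers)

-- ===== LEMMAS AND PROOFS =====

-- x inserted before a head it must precede
theorem insertBy_cons_of_before {α : Type} (before : α → α → Bool) (x : α) (ys : List α)
    (h : ∀ y ∈ ys, before x y = true) :
    PySem.List.insertBy before x ys = x :: ys := by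
  cases ys with
  | nil => rfl
  | cons y t => simp [PySem.List.insertBy, h y (by simp)]

-- x passes over a prefix none of whose elements it precedes
theorem insertBy_append_of_not_before {α : Type} (before : α → α → Bool) (x : α)
    (A C : List α) (h : ∀ a ∈ A, before x a = false) :
    PySem.List.insertBy before x (A ++ C) = A ++ PySem.List.insertBy before x C := by
  induction A with
  | nil => rfl
  | cons a t ih =>
      simp only [List.cons_append, PySem.List.insertBy, h a (by simp)]
      simp only [Bool.false_eq_true, if_false]
      rw [ih (fun a ha => h a (by simp [ha]))]

def bucketsOf {α κ : Type} [DecidableEq κ] (key : α → κ) (ks : List κ) (xs : List α) : List α :=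
  ks.flatMap (fun k => xs.filter (fun y => decide (key y = k)))

theorem insertBy_buckets {α κ : Type} [LinearOrder κ] (key : α → κ) (ks : List κ)
    (hks : ks.Pairwise (· > ·)) (x : α) (hx : key x ∈ ks) (xs : List α) :
    PySem.List.insertBy (fun a b => decide (key b < key a)) x (bucketsOf key ks xs)
      = bucketsOf key ks (xs ++ [x]) := by
  induction ks with
  | nil => simp at hx
  | cons k ks' ih =>
      rcases List.pairwise_cons.mp hks with ⟨hk, hks'⟩
      simp only [bucketsOf, List.flatMap_cons] at *
      rcases List.mem_cons.mp hx with hxk | hxk'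
      · -- key x = k : x goes to the end of bucket k
        have hA : ∀ a ∈ xs.filter (fun y => decide (key y = k)),
            (fun a b => decide (key b < key a)) x a = false := by
          intro a ha
          have := of_decide_eq_true (List.mem_filter.mp ha).2
          simp [this, hxk]
        rw [insertBy_append_of_not_before _ _ _ _ hA]
        have hC : ∀ y ∈ ks'.flatMap (fun k => xs.filter (fun y => decide (key y = k))),
            (fun a b => decide (key b < key a)) x y = true := by
          intro y hy
          rcases List.mem_flatMap.mp hy with ⟨k', hk', hyk'⟩
          have h1 := of_decide_eq_true (List.mem_filter.mp hyk').2
          have h2 : k > k' := hk _ hk'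
          simp only [h1, hxk, decide_eq_true_eq]
          exact h2
        rw [insertBy_cons_of_before _ _ _ hC]
        have hfilt : (xs ++ [x]).filter (fun y => decide (key y = k))
            = xs.filter (fun y => decide (key y = k)) ++ [x] := by
          simp [List.filter_append, hxk]
        have hrest : ks'.flatMap (fun k => (xs ++ [x]).filter (fun y => decide (key y = k)))
            = ks'.flatMap (fun k => xs.filter (fun y => decide (key y = k))) := by
          apply List.flatMap_congr
          intro k' hk'
          have : key x ≠ k' := by
            have h2 : k > k' := hk _ hk'
            rw [hxk]; exact ne_of_gt h2
          simp [List.filter_append, this]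
        rw [hfilt, hrest]
        simp
      · -- key x ∈ ks' : x skips bucket k and recurses
        have hlt : key x < k := hk _ hxk'
        have hA : ∀ a ∈ xs.filter (fun y => decide (key y = k)),
            (fun a b => decide (key b < key a)) x a = false := by
          intro a ha
          have := of_decide_eq_true (List.mem_filter.mp ha).2
          simp only [this, decide_eq_false_iff_not, not_lt]
          exact le_of_lt hlt
        rw [insertBy_append_of_not_before _ _ _ _ hA]
        rw [ih hks' hxk']
        have hfilt : (xs ++ [x]).filter (fun y => decide (key y = k))
            = xs.filter (fun y => decide (key y = k)) := by
          simp [List.filter_append, ne_of_lt hlt]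
        rw [hfilt]

theorem sorted_rev_eq_buckets {α κ : Type} [LinearOrder κ] (key : α → κ) (ks : List κ)
    (hks : ks.Pairwise (· > ·)) (xs : List α) (hxs : ∀ x ∈ xs, key x ∈ ks) :
    PySem.List.sorted xs key true = bucketsOf key ks xs := by
  rw [PySem.List.sorted_rev_eq_foldl_insertBy]
  induction xs using List.reverseRecOn with
  | nil => simp [bucketsOf]
  | append_singleton t x ih =>
      rw [List.foldl_append]
      simp only [List.foldl_cons, List.foldl_nil]
      rw [ih (fun y hy => hxs y (by simp [hy]))]
      exact insertBy_buckets key ks hks x (hxs x (by simp)) t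

theorem digit_mem : ∀ m : Int, 0 ≤ m → m < 10 →
    PySem.Int.toStr m ∈ (["9","8","7","6","5","4","3","2","1","0"] : List String) := by
  intro m h1 h2
  interval_cases m <;> decide

theorem toStr_digit_eq_iff (m d : Int) (h1 : 0 ≤ m) (h2 : m < 10) (h3 : 0 ≤ d) (h4 : d < 10) :
    (PySem.Int.toStr m = PySem.Int.toStr d) ↔ m = d := by
  constructor
  · intro h
    interval_cases m <;> interval_cases d <;> simp_all <;> revert h <;> decide
  · intro h; rw [h]

-- membership in enumerate gives the original element back at that index
theorem mem_enumerate_getElem {α : Type} : ∀ (l : List α) (n i : Int) (v : α),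
    (i, v) ∈ PySem.List.enumerate l n →
    0 ≤ i - n ∧ ∃ h : (i - n).toNat < l.length, l[(i - n).toNat] = v := by
  intro l
  induction l with
  | nil => intro n i v h; simp [PySem.List.enumerate] at h
  | cons x t ih =>
      intro n i v h
      simp only [PySem.List.enumerate, List.mem_cons] at h
      rcases h with h | h
      · obtain ⟨h1, h2⟩ := Prod.mk.injEq .. |>.mp h
        subst h1; subst h2
        refine ⟨by omega, ⟨by simp, ?_⟩⟩
        simp
      · rcases ih (n + 1) i v h with ⟨h1, h2, h3⟩
        have hsucc : (i - n).toNat = (i - (n + 1)).toNat + 1 := by omega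
        refine ⟨by omega, ⟨by simp [hsucc]; omega, ?_⟩⟩
        simp only [hsucc, List.getElem_cons_succ]
        exact h3

theorem filter_map_enumerate {α β : Type} (q : α → Bool) (h : α → β) :
    ∀ (l : List α) (n : Int),
    ((PySem.List.enumerate l n).filter (fun p => q p.2)).map (fun p => h p.2)
      = (l.filter q).map h := by
  intro l
  induction l with
  | nil => intro n; rfl
  | cons x t ih =>
      intro n
      simp only [PySem.List.enumerate, List.filter_cons]
      by_cases hq : q x
      · simp only [hq, if_true, List.map_cons, ih]
      · simp only [hq, Bool.false_eq_true, if_false, ih]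

-- string foldl-append is join of the mapped pieces
theorem foldl_append_eq_join {α : Type} (g : α → String) :
    ∀ (l : List α) (acc : String),
    l.foldl (fun a x => a ++ g x) acc = acc ++ PySem.Str.join "" (l.map g) := by
  intro l
  induction l with
  | nil =>
      intro acc
      simp [PySem.Str.join, PySem.Chars.join, List.intercalate]
  | cons x t ih =>
      intro acc
      simp only [List.foldl_cons, List.map_cons, ih]
      have hjoin : PySem.Str.join "" (g x :: t.map g)
          = g x ++ PySem.Str.join "" (t.map g) := by
        simp only [PySem.Str.join, PySem.Chars.join, List.map_cons]
        have hnil : ("" : String).toList = [] := rfl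
        have hic : ∀ L : List (List Char), List.intercalate ([] : List Char) L = L.flatten := by
          intro L
          induction L with
          | nil => rfl
          | cons a T ihL =>
              cases T with
              | nil => simp [List.intercalate]
              | cons b T' =>
                  simp [List.intercalate] at ihL ⊢
                  simpa using ihL
        rw [hnil, hic, hic]
        simp [String.ofList_append]
      rw [hjoin, String.append_assoc]

-- the per-digit bucket of A's pairs equals B's per-digit piece
theorem bucket_piece (numbers : List Int) (d : Int) (h3 : 0 ≤ d) (h4 : d < 10) :
    ((( PySem.List.enumerate numbers).map
        (fun p => (PySem.Int.toStr (PySem.Int.mod p.2 10), p.1))).filter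
          (fun y => decide (y.1 = PySem.Int.toStr d))).map
      (fun i => PySem.Int.toStr (PySem.List.pyGetD numbers i.2 0))
    = (numbers.filter (fun v => PySem.Int.mod v 10 == d)).map PySem.Int.toStr := by
  rw [List.filter_map, List.map_map]
  have hcong : ((PySem.List.enumerate numbers).filter
        ((fun y => decide (y.1 = PySem.Int.toStr d)) ∘
          (fun p => (PySem.Int.toStr (PySem.Int.mod p.2 10), p.1)))).map
        ((fun i => PySem.Int.toStr (PySem.List.pyGetD numbers i.2 0)) ∘
          (fun p => (PySem.Int.toStr (PySem.Int.mod p.2 10), p.1)))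
      = ((PySem.List.enumerate numbers).filter
          (fun p => PySem.Int.mod p.2 10 == d)).map (fun p => PySem.Int.toStr p.2) := by
    have hpred : ∀ p : Int × Int,
        ((fun y => decide (y.1 = PySem.Int.toStr d)) ∘
          (fun p => (PySem.Int.toStr (PySem.Int.mod p.2 10), p.1))) p
        = (PySem.Int.mod p.2 10 == d) := by
      intro p
      simp only [Function.comp]
      have hiff := toStr_digit_eq_iff (PySem.Int.mod p.2 10) d
        (PySem.Int.mod_nonneg _ (by norm_num)) (PySem.Int.mod_lt _ (by norm_num)) h3 h4
      rw [show (PySem.Int.mod p.2 10 == d) = decide (PySem.Int.mod p.2 10 = d) from rfl,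
          decide_eq_decide]
      exact hiff
    rw [List.filter_congr (fun p _ => hpred p)]
    apply List.map_congr_left
    intro p hp
    have hp' := List.mem_of_mem_filter hp
    obtain ⟨i, v⟩ := p
    rcases mem_enumerate_getElem numbers 0 i v hp' with ⟨h1, h2, h3⟩
    simp only [Int.sub_zero] at h1 h2 h3
    simp only [Function.comp]
    have hv : PySem.List.pyGetD numbers i 0 = v := by
      rw [PySem.List.pyGetD_eq_getElem numbers 0 h1 (by omega)]
      exact h3
    rw [hv]
  rw [hcong]
  exact filter_map_enumerate (fun v => PySem.Int.mod v 10 == d) PySem.Int.toStr numbers 0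

-- ===== VERDICT (by name: the statement is the Claim_ definition above) =====
theorem solution_spec : Claim_equal_solution := by
  intro numbers _
  unfold Spec_solution solution solution_alt
  rw [PySem.List.foldl_append_singleton_eq_map]
  simp only [List.nil_append]
  have hpair : (["9","8","7","6","5","4","3","2","1","0"] : List String).Pairwise (· > ·) := by
    have h0 : (["9","8","7","6","5","4","3","2","1","0"] : List String).Pairwise
        (fun a b => b.toList < a.toList) := by decide
    exact h0.imp (fun h => String.lt_iff_toList_lt.mpr h)
  have hmem : ∀ x ∈ (PySem.List.enumerate numbers).map
      (fun p => (PySem.Int.toStr (PySem.Int.mod p.2 10), p.1)),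
      (fun y : String × Int => y.1) x ∈ (["9","8","7","6","5","4","3","2","1","0"] : List String) := by
    intro x hx
    rcases List.mem_map.mp hx with ⟨p, hp, rfl⟩
    exact digit_mem _ (PySem.Int.mod_nonneg _ (by norm_num)) (PySem.Int.mod_lt _ (by norm_num))
  rw [sorted_rev_eq_buckets (fun y : String × Int => y.1)
        (["9","8","7","6","5","4","3","2","1","0"]) hpair _ hmem]
  rw [foldl_append_eq_join]
  rw [show ("" : String) ++ PySem.Str.join ""
        ((bucketsOf (fun y : String × Int => y.1) (["9","8","7","6","5","4","3","2","1","0"])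
          ((PySem.List.enumerate numbers).map
            (fun p => (PySem.Int.toStr (PySem.Int.mod p.2 10), p.1)))).map
          (fun i => PySem.Int.toStr (PySem.List.pyGetD numbers i.2 0)))
      = PySem.Str.join ""
        ((bucketsOf (fun y : String × Int => y.1) (["9","8","7","6","5","4","3","2","1","0"])
          ((PySem.List.enumerate numbers).map
            (fun p => (PySem.Int.toStr (PySem.Int.mod p.2 10), p.1)))).map
          (fun i => PySem.Int.toStr (PySem.List.pyGetD numbers i.2 0)))
      from String.empty_append]
  congr 1
  rw [show PySem.List.pyRange 9 (-1) (-1) = ([9,8,7,6,5,4,3,2,1,0] : List Int) from rfl]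
  unfold bucketsOf
  simp only [List.flatMap_cons, List.flatMap_nil, List.map_append, List.append_nil]
  rw [show ("9" : String) = PySem.Int.toStr 9 from rfl, show ("8" : String) = PySem.Int.toStr 8 from rfl,
      show ("7" : String) = PySem.Int.toStr 7 from rfl, show ("6" : String) = PySem.Int.toStr 6 from rfl,
      show ("5" : String) = PySem.Int.toStr 5 from rfl, show ("4" : String) = PySem.Int.toStr 4 from rfl,
      show ("3" : String) = PySem.Int.toStr 3 from rfl, show ("2" : String) = PySem.Int.toStr 2 from rfl,
      show ("1" : String) = PySem.Int.toStr 1 from rfl, show ("0" : String) = PySem.Int.toStr 0 from rfl]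
  rw [bucket_piece numbers 9 (by norm_num) (by norm_num),
      bucket_piece numbers 8 (by norm_num) (by norm_num),
      bucket_piece numbers 7 (by norm_num) (by norm_num),
      bucket_piece numbers 6 (by norm_num) (by norm_num),
      bucket_piece numbers 5 (by norm_num) (by norm_num),
      bucket_piece numbers 4 (by norm_num) (by norm_num),
      bucket_piece numbers 3 (by norm_num) (by norm_num),
      bucket_piece numbers 2 (by norm_num) (by norm_num),
      bucket_piece numbers 1 (by norm_num) (by norm_num),
      bucket_piece numbers 0 (by norm_num) (by norm_num)]
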